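-- pv_equiv track=rewrite | github.com/ZJU-PL/aria | aria/bool/analysis/metrics.py | literal_balance
-- ===== SOURCE A (Python) =====
-- from typing import Dict, List, Sequence, Union
--
-- def literal_balance(clauses: Sequence[Sequence[int]]) -> Dict[str, int]:
--     """Count positive and negative literal occurrences."""
--
--     positive = 0
--     negative = 0
--     for clause in clauses:
--         for literal in clause:
--             if literal > 0:
--                 positive += 1
--             else:
--                 negative += 1
--     return {
--         "positive_literals": positive,
--         "negative_literals": negative,
--         "total_literals": positive + negative,
--     }
-- ===== SOURCE B (Python) =====
-- def literal_balance(clauses):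
--     """Count positive and negative literal occurrences."""
--     total = sum(len(clause) for clause in clauses)
--     positive = sum(1 for clause in clauses for literal in clause if literal > 0)
--     return {
--         "positive_literals": positive,
--         "negative_literals": total - positive,
--         "total_literals": total,
--     }
-- ===== Notes on version B (the rewrite author's own statement) =====
-- stated objective: alternative
-- what changed: Replaces A's single nested loop with a per-element if/else counter pair by two independent passes (a length sum and a positive-literal count) and derives the negative count by subtraction.
import Mathlib
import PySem

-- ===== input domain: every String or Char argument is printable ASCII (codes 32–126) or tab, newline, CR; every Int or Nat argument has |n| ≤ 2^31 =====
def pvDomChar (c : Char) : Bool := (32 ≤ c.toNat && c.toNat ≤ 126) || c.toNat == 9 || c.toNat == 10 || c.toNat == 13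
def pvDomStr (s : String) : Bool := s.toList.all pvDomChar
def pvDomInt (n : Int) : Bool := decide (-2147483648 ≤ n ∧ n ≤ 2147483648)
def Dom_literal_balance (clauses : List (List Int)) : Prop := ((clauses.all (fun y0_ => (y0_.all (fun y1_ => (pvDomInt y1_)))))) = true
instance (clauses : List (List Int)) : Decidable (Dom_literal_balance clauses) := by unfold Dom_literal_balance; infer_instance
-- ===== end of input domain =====

-- B computes the same counts by two separate passes (length sum + positive count) and subtraction instead of A's single nested if/else loop; same cost.
-- ===== PORT A =====
def literal_balance (clauses : List (List Int)) : List (String × Int) :=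
  let st := clauses.foldl (fun (pn : Int × Int) clause =>
    clause.foldl (fun (pn : Int × Int) literal =>
      if literal > 0 then (pn.1 + 1, pn.2) else (pn.1, pn.2 + 1)) pn) (0, 0)
  [("positive_literals", st.1), ("negative_literals", st.2),
   ("total_literals", st.1 + st.2)]

-- ===== PORT B =====
def literal_balance_alt (clauses : List (List Int)) : List (String × Int) :=
  let total : Int := (clauses.map (fun clause => (clause.length : Int))).sum
  let positive : Int := (clauses.map (fun clause => ((clause.filter (fun l => l > 0)).length : Int))).sum
  [("positive_literals", positive), ("negative_literals", total - positive),
   ("total_literals", total)]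

-- ===== PRECONDITION & SPEC =====
def Spec_literal_balance (clauses : List (List Int)) (out : List (String × Int)) : Prop := out = literal_balance_alt clauses
instance (clauses : List (List Int)) (out : List (String × Int)) : Decidable (Spec_literal_balance clauses out) := by unfold Spec_literal_balance; infer_instance

-- ===== CLAIM (what is proved, stated in full; the proofs are below) =====
def Claim_equal_literal_balance : Prop := ∀ (clauses : List (List Int)), Dom_literal_balance clauses → Spec_literal_balance clauses (literal_balance clauses)

-- ===== LEMMAS AND PROOFS =====

-- ===== VERDICT (by name: the statement is the Claim_ definition above) =====
-- The fold state after processing any prefix equals (positives so far, rest so far).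
theorem lb_inner (clause : List Int) (p n : Int) :
    clause.foldl (fun (pn : Int × Int) literal =>
      if literal > 0 then (pn.1 + 1, pn.2) else (pn.1, pn.2 + 1)) (p, n)
    = (p + ((clause.filter (fun l => l > 0)).length : Int),
       n + ((clause.length : Int) - ((clause.filter (fun l => l > 0)).length : Int))) := by
  induction clause generalizing p n with
  | nil => simp
  | cons x xs ih =>
    by_cases h : x > 0 <;>
      simp [List.foldl, h, ih] <;> ring

theorem lb_outer (clauses : List (List Int)) (p n : Int) :
    clauses.foldl (fun (pn : Int × Int) clause =>
      clause.foldl (fun (pn : Int × Int) literal =>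
        if literal > 0 then (pn.1 + 1, pn.2) else (pn.1, pn.2 + 1)) pn) (p, n)
    = (p + (clauses.map (fun clause => ((clause.filter (fun l => l > 0)).length : Int))).sum,
       n + ((clauses.map (fun clause => (clause.length : Int))).sum
            - (clauses.map (fun clause => ((clause.filter (fun l => l > 0)).length : Int))).sum)) := by
  induction clauses generalizing p n with
  | nil => simp
  | cons c cs ih =>
    simp [List.foldl, lb_inner, ih]; constructor <;> ring

theorem literal_balance_spec : Claim_equal_literal_balance := by
  intro clauses _
  unfold Spec_literal_balance literal_balance literal_balance_alt
  rw [lb_outer]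
  simp
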